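-- pv_equiv track=rewrite | github.com/goodmami/wn | wn/compat/sensekey.py | _escape_oewn
-- ===== SOURCE A (Python) =====
-- OEWN_LEMMA_UNESCAPE_SEQUENCES = [
--     ('-ap-', "'"),
--     ('-ex-', '!'),
--     ('-cm-', ','),
--     ('-cn-', ':'),
--     ('-pl-', '+'),
--     ('-sl-', '/'),
-- ]
--
-- def _escape_oewn(sense_key: str) -> str:
--     lemma, _, rest = sense_key.partition('%')
--     for esc, char in OEWN_LEMMA_UNESCAPE_SEQUENCES:
--         lemma = lemma.replace(char, esc)
--     rest = rest.replace(':', '.').replace('_', '-sp-')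
--     if rest:
--         return f'{lemma}__{rest}'
--     else:
--         return lemma
-- ===== SOURCE B (Python) =====
-- _LEMMA_ESC = {"'": '-ap-', '!': '-ex-', ',': '-cm-', ':': '-cn-', '+': '-pl-', '/': '-sl-'}
-- _REST_ESC = {':': '.', '_': '-sp-'}
--
--
-- def _escape_oewn(sense_key: str) -> str:
--     parts = []
--     rest_parts = []
--     in_rest = False
--     for c in sense_key:
--         if in_rest:
--             rest_parts.append(_REST_ESC.get(c, c))
--         elif c == '%':
--             in_rest = True
--         else:
--             parts.append(_LEMMA_ESC.get(c, c))
--     if rest_parts: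
--         parts.append('__')
--         parts += rest_parts
--     return ''.join(parts)
-- ===== Notes on version B (the rewrite author's own statement) =====
-- stated objective: alternative
-- what changed: Replaces A's partition-then-eight-sequential-full-string-.replace()-passes with ONE pass over the whole string: a mode flag flips at the first '%', and each character is appended already escaped via a lookup table for its side, so neither partition nor any replace pass exists in B.
import Mathlib
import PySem

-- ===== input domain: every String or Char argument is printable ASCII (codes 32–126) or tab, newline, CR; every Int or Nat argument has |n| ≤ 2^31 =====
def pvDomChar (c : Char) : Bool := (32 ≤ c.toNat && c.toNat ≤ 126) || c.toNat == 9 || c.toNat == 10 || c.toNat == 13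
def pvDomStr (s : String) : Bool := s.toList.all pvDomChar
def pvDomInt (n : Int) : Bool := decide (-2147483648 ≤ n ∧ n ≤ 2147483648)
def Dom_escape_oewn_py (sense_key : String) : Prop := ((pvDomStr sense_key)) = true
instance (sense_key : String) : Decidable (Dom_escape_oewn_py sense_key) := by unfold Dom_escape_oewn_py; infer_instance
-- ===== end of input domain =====

-- B replaces A's partition + eight sequential full-string replace passes by ONE pass over the
-- whole string with a mode flag that flips at the first '%' (alternative decomposition).

-- ===== PORT A =====
def pvOEWN_SEQ : List (List Char × Char) :=
  [("-ap-".toList, '\''), ("-ex-".toList, '!'), ("-cm-".toList, ','),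
   ("-cn-".toList, ':'), ("-pl-".toList, '+'), ("-sl-".toList, '/')]

def escape_oewn_py (sense_key : String) : String :=
  -- str.partition('%') ported by hand (no PySem primitive): split at the FIRST '%'; exact
  let cs := sense_key.toList
  let i := PySem.Chars.find cs ['%']
  let lemma0 := if i = -1 then cs else cs.take i.toNat
  let rest0  := if i = -1 then [] else cs.drop (i.toNat + 1)
  let lemma1 := pvOEWN_SEQ.foldl (fun l p => PySem.Chars.replace l [p.2] p.1) lemma0
  let rest1  := PySem.Chars.replace (PySem.Chars.replace rest0 [':'] ['.']) ['_'] "-sp-".toList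
  if rest1.isEmpty then String.ofList lemma1 else String.ofList (lemma1 ++ "__".toList ++ rest1)

-- ===== PORT B =====
def pvLemmaEsc : PySem.Dict Char (List Char) :=
  PySem.Dict.ofList [('\'', "-ap-".toList), ('!', "-ex-".toList), (',', "-cm-".toList),
                     (':', "-cn-".toList), ('+', "-pl-".toList), ('/', "-sl-".toList)]

def pvRestEsc : PySem.Dict Char (List Char) :=
  PySem.Dict.ofList [(':', ['.']), ('_', "-sp-".toList)]

def pvAltStep (st : Bool × List Char × List Char) (c : Char) : Bool × List Char × List Char :=
  if st.1 then (st.1, st.2.1, st.2.2 ++ pvRestEsc.getD c [c])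
  else if c = '%' then (true, st.2.1, st.2.2)
  else (st.1, st.2.1 ++ pvLemmaEsc.getD c [c], st.2.2)

def escape_oewn_py_alt (sense_key : String) : String :=
  let st := sense_key.toList.foldl pvAltStep (false, [], [])
  if st.2.2.isEmpty then String.ofList st.2.1
  else String.ofList (st.2.1 ++ "__".toList ++ st.2.2)

-- ===== PRECONDITION & SPEC =====
def Spec_escape_oewn_py (sense_key : String) (out : String) : Prop := out = escape_oewn_py_alt sense_key
instance (sense_key : String) (out : String) : Decidable (Spec_escape_oewn_py sense_key out) := by unfold Spec_escape_oewn_py; infer_instance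

-- ===== CLAIM (what is proved, stated in full; the proofs are below) =====
def Claim_equal_escape_oewn_py : Prop := ∀ (sense_key : String), Dom_escape_oewn_py sense_key → Spec_escape_oewn_py sense_key (escape_oewn_py sense_key)

-- ===== LEMMAS AND PROOFS =====

/-- A single-character `replace` is a per-character flatMap. -/
theorem replace_single_go (ch : Char) (new : List Char) :
    ∀ (l : List Char) (fuel : Nat) (acc : List Char), l.length ≤ fuel →
      PySem.Chars.replace.go [ch] new fuel l acc
        = acc.reverse ++ l.flatMap (fun c => if c = ch then new else [c]) := by
  intro l
  induction l with
  | nil =>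
    intro fuel acc _
    cases fuel <;> simp [PySem.Chars.replace.go]
  | cons c t ih =>
    intro fuel acc hfuel
    cases fuel with
    | zero => simp at hfuel
    | succ fuel =>
      by_cases h : c = ch
      · subst h
        rw [PySem.Chars.replace.go]
        simp only [List.isPrefixOf]
        rw [if_pos (by simp)]
        simp only [List.length_cons, List.length_nil, List.drop_succ_cons, List.drop_zero]
        rw [ih _ _ (by simpa using Nat.le_of_succ_le_succ hfuel)]
        simp
      · rw [PySem.Chars.replace.go]
        rw [if_neg (by simp [List.isPrefixOf]; intro hc; exact h (by simpa using hc.symm))]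
        rw [ih _ _ (by simpa using Nat.le_of_succ_le_succ hfuel)]
        simp [h]

theorem replace_single (ch : Char) (new : List Char) (l : List Char) :
    PySem.Chars.replace l [ch] new = l.flatMap (fun c => if c = ch then new else [c]) := by
  rw [PySem.Chars.replace]
  simp only [List.isEmpty_cons, Bool.false_eq_true, if_false]
  exact replace_single_go ch new l l.length [] le_rfl

theorem lemma_chain (l : List Char) :
    pvOEWN_SEQ.foldl (fun l p => PySem.Chars.replace l [p.2] p.1) l
      = l.flatMap (fun c => pvLemmaEsc.getD c [c]) := by
  simp only [pvOEWN_SEQ, List.foldl_cons, List.foldl_nil, replace_single, List.flatMap_assoc]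
  apply List.flatMap_congr
  intro c _
  by_cases h1 : c = '\''; · subst h1; decide
  by_cases h2 : c = '!';  · subst h2; decide
  by_cases h3 : c = ',';  · subst h3; decide
  by_cases h4 : c = ':';  · subst h4; decide
  by_cases h5 : c = '+';  · subst h5; decide
  by_cases h6 : c = '/';  · subst h6; decide
  have hd : pvLemmaEsc = PySem.Dict.mk
      [('\'', "-ap-".toList), ('!', "-ex-".toList), (',', "-cm-".toList),
       (':', "-cn-".toList), ('+', "-pl-".toList), ('/', "-sl-".toList)] := by decide
  simp [h1, h2, h3, h4, h5, h6, hd, PySem.Dict.getD, beq_iff_eq,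
        PySem.Dict.get?, Ne.symm h1, Ne.symm h2, Ne.symm h3, Ne.symm h4, Ne.symm h5, Ne.symm h6]

theorem rest_chain (l : List Char) :
    PySem.Chars.replace (PySem.Chars.replace l [':'] ['.']) ['_'] "-sp-".toList
      = l.flatMap (fun c => pvRestEsc.getD c [c]) := by
  simp only [replace_single, List.flatMap_assoc]
  apply List.flatMap_congr
  intro c _
  by_cases h1 : c = ':'; · subst h1; decide
  by_cases h2 : c = '_'; · subst h2; decide
  have hd : pvRestEsc = PySem.Dict.mk [(':', ['.']), ('_', "-sp-".toList)] := by decide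
  simp [h1, h2, hd, PySem.Dict.getD, beq_iff_eq,
        PySem.Dict.get?, Ne.symm h1, Ne.symm h2]

/-- Once the flag is set, the fold only appends rest-escapes. -/
theorem fold_true (cs : List Char) : ∀ (parts rest : List Char),
    cs.foldl pvAltStep (true, parts, rest)
      = (true, parts, rest ++ cs.flatMap (fun c => pvRestEsc.getD c [c])) := by
  induction cs with
  | nil => intro parts rest; simp
  | cons c t ih => intro parts rest; simp [pvAltStep, ih]

/-- Before the flag is set, on a '%'-free prefix the fold appends lemma-escapes. -/
theorem fold_false_free (cs : List Char) : ∀ (parts : List Char), '%' ∉ cs →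
    cs.foldl pvAltStep (false, parts, [])
      = (false, parts ++ cs.flatMap (fun c => pvLemmaEsc.getD c [c]), []) := by
  induction cs with
  | nil => intro parts _; simp
  | cons c t ih =>
    intro parts h
    have hc : ¬ c = '%' := fun hc => h (hc ▸ List.mem_cons_self)
    simp only [List.foldl_cons, pvAltStep, Bool.false_eq_true, if_false, if_neg hc]
    rw [ih _ (fun hm => h (List.mem_cons_of_mem _ hm))]
    simp

theorem fold_split (pre post : List Char) (h : '%' ∉ pre) :
    (pre ++ '%' :: post).foldl pvAltStep (false, [], [])
      = (true, pre.flatMap (fun c => pvLemmaEsc.getD c [c]),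
         post.flatMap (fun c => pvRestEsc.getD c [c])) := by
  rw [List.foldl_append, fold_false_free pre [] h]
  simp only [List.foldl_cons, pvAltStep, Bool.false_eq_true, if_false]
  simpa using fold_true post _ []

/-- A one-character list is an infix iff the character is a member. -/
theorem singleton_infix_iff_mem (ch : Char) (cs : List Char) :
    [ch] <:+: cs ↔ ch ∈ cs := by
  constructor
  · intro h; exact h.sublist.mem List.mem_cons_self
  · intro h
    obtain ⟨l, r, rfl⟩ := List.append_of_mem h
    exact ⟨l, r, by simp⟩

-- ===== VERDICT (by name: the statement is the Claim_ definition above) =====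
theorem escape_oewn_py_spec : Claim_equal_escape_oewn_py := by
  intro sense_key _
  unfold Spec_escape_oewn_py escape_oewn_py escape_oewn_py_alt
  simp only [lemma_chain, rest_chain]
  set cs := sense_key.toList with hcs
  by_cases hmem : '%' ∈ cs
  · have hfind : PySem.Chars.find cs ['%'] ≠ -1 :=
      (PySem.Chars.find_ne_neg_one_iff _ _).mpr ((singleton_infix_iff_mem _ _).mpr hmem)
    have hnn : 0 ≤ PySem.Chars.find cs ['%'] := by
      rcases (PySem.Chars.neg_one_le_find cs ['%']).lt_or_eq with h | h
      · omega
      · exact absurd h.symm hfind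
    obtain ⟨hpre, hmin⟩ := PySem.Chars.find_spec (s := cs) (sub := ['%']) hnn
    set n := (PySem.Chars.find cs ['%']).toNat with hn
    obtain ⟨t, ht⟩ := hpre
    have hdropn : cs.drop n = '%' :: t := by simpa using ht.symm
    have hteq : t = cs.drop (n + 1) := by
      have := congrArg List.tail hdropn
      simpa [List.tail_drop] using this.symm
    have hsplit : cs = cs.take n ++ '%' :: cs.drop (n + 1) := by
      conv_lhs => rw [← List.take_append_drop n cs]
      rw [hdropn, hteq]
    have hfree : '%' ∉ cs.take n := by
      intro hm
      obtain ⟨j, hj, hget⟩ := List.getElem_of_mem hm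
      have hjn : j < n := lt_of_lt_of_le hj (by simp [List.length_take])
      have hjlen : j < cs.length := lt_of_lt_of_le hj (by simp [List.length_take])
      apply hmin j hjn
      have : cs.drop j = '%' :: cs.drop (j + 1) := by
        rw [List.drop_eq_getElem_cons hjlen]
        congr 1
        rw [← hget, List.getElem_take]
      exact ⟨cs.drop (j + 1), by simp [this]⟩
    rw [if_neg hfind, if_neg hfind]
    conv_rhs => rw [hsplit]
    rw [fold_split _ _ hfree]
  · have hfind : PySem.Chars.find cs ['%'] = -1 :=
      (PySem.Chars.find_eq_neg_one_iff _ _).mpr (fun h => hmem ((singleton_infix_iff_mem _ _).mp h))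
    rw [if_pos hfind, if_pos hfind, fold_false_free cs [] hmem]
    simp
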